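-- pv_equiv track=rewrite | github.com/emmajn/Coding_Practice | Python/Diophantine equations/PSET_2.py | finding_packages
-- ===== SOURCE A (Python) =====
-- def finding_packages(n, l, non_solutions, packages):
--     for a in range(0, round(n/packages[0])+2):
--         for b in range(0, round(n/packages[1])+2):
--             for c in range(0, round(n/packages[2])+2):
--                 coeff = [a, b, c]
--                 products = sum([x * y for x, y in zip(list(packages), coeff)])
--                 if products == n:
--                     l.append(products)
--                     return coeff
--     return non_solutions.append(n)
-- ===== SOURCE B (Python) =====
-- # Drop the inner c-loop; for each (a, b) solve c directly by divisibility.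
-- # Same in-place mutations as A (appends to l on success, to non_solutions on failure).
-- def finding_packages(n, l, non_solutions, packages):
--     for a in range(0, round(n / packages[0]) + 2):
--         for b in range(0, round(n / packages[1]) + 2):
--             rem = n - a * packages[0] - b * packages[1]
--             if rem % packages[2] == 0:
--                 c = rem // packages[2]
--                 if 0 <= c < round(n / packages[2]) + 2:
--                     l.append(n)
--                     return [a, b, c]
--     return non_solutions.append(n)
-- ===== Notes on version B (the rewrite author's own statement) =====
-- stated objective: alternative
-- what changed: B drops A's innermost brute-force c-loop: for each (a,b) it computes the remainder n-a*p0-b*p1 and solves c directly by a divisibility check plus a range-bound test.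
import Mathlib
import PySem

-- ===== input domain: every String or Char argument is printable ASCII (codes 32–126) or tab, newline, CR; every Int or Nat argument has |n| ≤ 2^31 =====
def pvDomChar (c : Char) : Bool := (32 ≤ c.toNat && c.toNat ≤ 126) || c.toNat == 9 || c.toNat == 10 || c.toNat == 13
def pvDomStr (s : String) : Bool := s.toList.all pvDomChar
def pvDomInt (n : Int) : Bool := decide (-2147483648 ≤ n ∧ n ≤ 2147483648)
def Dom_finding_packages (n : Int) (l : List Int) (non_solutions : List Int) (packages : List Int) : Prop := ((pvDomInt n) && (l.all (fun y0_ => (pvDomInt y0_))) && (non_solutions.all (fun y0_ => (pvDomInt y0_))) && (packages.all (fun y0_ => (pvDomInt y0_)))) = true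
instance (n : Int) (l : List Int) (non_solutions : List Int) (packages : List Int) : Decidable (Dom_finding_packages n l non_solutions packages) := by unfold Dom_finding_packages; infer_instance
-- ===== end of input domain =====

-- B replaces A's inner c-loop by solving c directly with a divisibility check; return-value
-- equivalence is proved — both Pythons also mutate l / non_solutions identically, which the
-- Lean ports (pure return values) do not model.

-- Python round(n/p) for |n|,|p| ≤ 2^31: exact rational round-half-to-even (at these magnitudes
-- the float division cannot move n/p across or onto a half-integer boundary, and exact ties are
-- represented exactly, so this hand port is exact on the stated domain).
def pvRoundDiv (n p : Int) : Int :=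
  let q := PySem.Int.floordiv n p
  let r := n - q * p
  if 2 * r.natAbs < p.natAbs then q
  else if p.natAbs < 2 * r.natAbs then q + 1
  else if PySem.Int.mod q 2 = 0 then q else q + 1

-- ===== PORT A =====
-- innermost loop: for c in range(0, round(n/packages[2])+2)
def fpA_c (n : Int) (packages : List Int) (a b : Int) : List Int → Option (List Int)
  | [] => none
  | c :: cs =>
    let coeff := [a, b, c]
    let products := ((packages.zip coeff).map (fun xy => xy.1 * xy.2)).sum
    if products = n then some coeff else fpA_c n packages a b cs

def fpA_b (n : Int) (packages : List Int) (a : Int) : List Int → Option (List Int)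
  | [] => none
  | b :: bs =>
    match fpA_c n packages a b (PySem.List.pyRange 0 (pvRoundDiv n (packages.getD 2 0) + 2) 1) with
    | some r => some r
    | none => fpA_b n packages a bs

def fpA_a (n : Int) (packages : List Int) : List Int → Option (List Int)
  | [] => none
  | a :: as_ =>
    match fpA_b n packages a (PySem.List.pyRange 0 (pvRoundDiv n (packages.getD 1 0) + 2) 1) with
    | some r => some r
    | none => fpA_a n packages as_

def finding_packages (n : Int) (l : List Int) (non_solutions : List Int) (packages : List Int) : Option (List Int) :=
  fpA_a n packages (PySem.List.pyRange 0 (pvRoundDiv n (packages.getD 0 0) + 2) 1)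

-- ===== PORT B =====
def fpB_b (n p0 p1 p2 : Int) (a : Int) : List Int → Option (List Int)
  | [] => none
  | b :: bs =>
    let rem := n - a * p0 - b * p1
    if PySem.Int.mod rem p2 = 0 then
      let c := PySem.Int.floordiv rem p2
      if 0 ≤ c ∧ c < pvRoundDiv n p2 + 2 then some [a, b, c]
      else fpB_b n p0 p1 p2 a bs
    else fpB_b n p0 p1 p2 a bs

def fpB_a (n p0 p1 p2 : Int) : List Int → Option (List Int)
  | [] => none
  | a :: as_ =>
    match fpB_b n p0 p1 p2 a (PySem.List.pyRange 0 (pvRoundDiv n p1 + 2) 1) with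
    | some r => some r
    | none => fpB_a n p0 p1 p2 as_

def finding_packages_alt (n : Int) (l : List Int) (non_solutions : List Int) (packages : List Int) : Option (List Int) :=
  fpB_a n (packages.getD 0 0) (packages.getD 1 0) (packages.getD 2 0)
    (PySem.List.pyRange 0 (pvRoundDiv n (packages.getD 0 0) + 2) 1)

-- ===== PRECONDITION & SPEC =====
-- Exactly the inputs on which A returns: each packages[i] is accessed (and divides) only when the
-- enclosing loop actually runs, so the existence/nonzeroness requirements are conditional on the
-- computed range bounds being positive (getD … 0 = 0 covers both a missing index and a zero divisor).
def Pre_finding_packages (n : Int) (l : List Int) (non_solutions : List Int) (packages : List Int) : Prop :=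
  packages.getD 0 0 ≠ 0 ∧
  (0 < pvRoundDiv n (packages.getD 0 0) + 2 →
    packages.getD 1 0 ≠ 0 ∧
    (0 < pvRoundDiv n (packages.getD 1 0) + 2 → packages.getD 2 0 ≠ 0))
instance (n : Int) (l : List Int) (non_solutions : List Int) (packages : List Int) : Decidable (Pre_finding_packages n l non_solutions packages) := by unfold Pre_finding_packages; infer_instance

def pvWitness_finding_packages : Int × List Int × List Int × List Int := (6, [], [], [2, 3, 5])

def Spec_finding_packages (n : Int) (l : List Int) (non_solutions : List Int) (packages : List Int) (out : Option (List Int)) : Prop := out = finding_packages_alt n l non_solutions packages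
instance (n : Int) (l : List Int) (non_solutions : List Int) (packages : List Int) (out : Option (List Int)) : Decidable (Spec_finding_packages n l non_solutions packages out) := by unfold Spec_finding_packages; infer_instance

-- ===== CLAIM (what is proved, stated in full; the proofs are below) =====
def Claim_equal_finding_packages : Prop := ∀ (n : Int) (l : List Int) (non_solutions : List Int) (packages : List Int), Dom_finding_packages n l non_solutions packages → Pre_finding_packages n l non_solutions packages → Spec_finding_packages n l non_solutions packages (finding_packages n l non_solutions packages)

-- ===== LEMMAS AND PROOFS =====

-- x2*c = rem  ↔  the divisibility/quotient test B performs
theorem pv_solve_iff (x2 c rem : Int) (h : x2 ≠ 0) :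
    x2 * c = rem ↔ (PySem.Int.mod rem x2 = 0 ∧ PySem.Int.floordiv rem x2 = c) := by
  constructor
  · rintro rfl
    have hd : x2 ∣ x2 * c := ⟨c, rfl⟩
    have hm : PySem.Int.mod (x2 * c) x2 = 0 := (PySem.Int.mod_eq_zero_iff_dvd _ _).2 hd
    refine ⟨hm, ?_⟩
    have hid := PySem.Int.floordiv_mul_add_mod (x2 * c) x2
    rw [hm, add_zero] at hid
    have : PySem.Int.floordiv (x2 * c) x2 * x2 = c * x2 := by rw [hid]; ring
    exact mul_right_cancel₀ h this
  · rintro ⟨hm, hq⟩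
    have hid := PySem.Int.floordiv_mul_add_mod rem x2
    rw [hm, add_zero, hq] at hid
    rw [← hid]; ring

theorem pv_cscan (n x0 x1 x2 : Int) (rest : List Int) (a b : Int) (h2 : x2 ≠ 0) :
    ∀ cl : List Int, fpA_c n (x0 :: x1 :: x2 :: rest) a b cl =
      if PySem.Int.mod (n - a * x0 - b * x1) x2 = 0 ∧
         PySem.Int.floordiv (n - a * x0 - b * x1) x2 ∈ cl
      then some [a, b, PySem.Int.floordiv (n - a * x0 - b * x1) x2] else none := by
  intro cl
  induction cl with
  | nil => simp [fpA_c]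
  | cons c cs ih =>
    have hprod : (((x0 :: x1 :: x2 :: rest).zip [a, b, c]).map (fun xy => xy.1 * xy.2)).sum
        = x0 * a + x1 * b + x2 * c := by
      simp [List.zip_cons_cons]; ring
    have hiff : (x0 * a + x1 * b + x2 * c = n) ↔
        (PySem.Int.mod (n - a * x0 - b * x1) x2 = 0 ∧
         PySem.Int.floordiv (n - a * x0 - b * x1) x2 = c) := by
      rw [← pv_solve_iff x2 c (n - a * x0 - b * x1) h2]
      constructor <;> intro hh <;> linarith
    by_cases hc : x0 * a + x1 * b + x2 * c = n
    · obtain ⟨hm, hq⟩ := hiff.1 hc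
      simp only [fpA_c, hprod, if_pos hc]
      rw [if_pos ⟨hm, by rw [hq]; exact List.mem_cons_self⟩, hq]
    · simp only [fpA_c, hprod, if_neg hc]
      rw [ih]
      by_cases hm : PySem.Int.mod (n - a * x0 - b * x1) x2 = 0
      · by_cases hq : PySem.Int.floordiv (n - a * x0 - b * x1) x2 = c
        · exact absurd (hiff.2 ⟨hm, hq⟩) hc
        · simp [hm, hq, List.mem_cons]
      · simp [hm]

theorem pv_bloop (n x0 x1 x2 : Int) (rest : List Int) (a : Int) (h2 : x2 ≠ 0) :
    ∀ bs : List Int, fpA_b n (x0 :: x1 :: x2 :: rest) a bs = fpB_b n x0 x1 x2 a bs := by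
  intro bs
  induction bs with
  | nil => rfl
  | cons b bs ih =>
    have hg : (x0 :: x1 :: x2 :: rest).getD 2 0 = x2 := rfl
    simp only [fpA_b, fpB_b, hg,
      pv_cscan n x0 x1 x2 rest a b h2, PySem.List.mem_pyRange_one]
    by_cases hm : PySem.Int.mod (n - a * x0 - b * x1) x2 = 0
    · by_cases hr : 0 ≤ PySem.Int.floordiv (n - a * x0 - b * x1) x2 ∧
          PySem.Int.floordiv (n - a * x0 - b * x1) x2 < pvRoundDiv n x2 + 2
      · simp [hm, hr]
      · simp [hm, hr, ih]
    · simp [hm, ih]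

theorem pv_aloop (n x0 x1 x2 : Int) (rest : List Int) (h2 : x2 ≠ 0) :
    ∀ as_ : List Int, fpA_a n (x0 :: x1 :: x2 :: rest) as_ = fpB_a n x0 x1 x2 as_ := by
  intro as_
  induction as_ with
  | nil => rfl
  | cons a as_ ih =>
    have hg : (x0 :: x1 :: x2 :: rest).getD 1 0 = x1 := rfl
    simp only [fpA_a, fpB_a, hg, pv_bloop n x0 x1 x2 rest a h2, ih]

theorem pv_aloop_none_A (n : Int) (packages : List Int)
    (h : PySem.List.pyRange 0 (pvRoundDiv n (packages.getD 1 0) + 2) 1 = []) :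
    ∀ as_ : List Int, fpA_a n packages as_ = none := by
  intro as_
  induction as_ with
  | nil => rfl
  | cons a as_ ih => simp only [fpA_a, h, fpA_b, ih]

theorem pv_aloop_none_B (n p0 p1 p2 : Int)
    (h : PySem.List.pyRange 0 (pvRoundDiv n p1 + 2) 1 = []) :
    ∀ as_ : List Int, fpB_a n p0 p1 p2 as_ = none := by
  intro as_
  induction as_ with
  | nil => rfl
  | cons a as_ ih => simp only [fpB_a, h, fpB_b, ih]

-- ===== VERDICT (by name: the statement is the Claim_ definition above) =====
theorem finding_packages_spec : Claim_equal_finding_packages := by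
  intro n l non_solutions packages _ hpre
  obtain ⟨h0, himp⟩ := hpre
  unfold Spec_finding_packages finding_packages finding_packages_alt
  by_cases hA : 0 < pvRoundDiv n (packages.getD 0 0) + 2
  · obtain ⟨h1, himp2⟩ := himp hA
    by_cases hB : 0 < pvRoundDiv n (packages.getD 1 0) + 2
    · have h2 := himp2 hB
      match packages, h2 with
      | x0 :: x1 :: x2 :: rest, h2 =>
        exact (pv_aloop n x0 x1 x2 rest h2 _).symm ▸ rfl
    · have hnil : PySem.List.pyRange 0 (pvRoundDiv n (packages.getD 1 0) + 2) 1 = [] :=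
        PySem.List.pyRange_one_eq_nil (by omega)
      rw [pv_aloop_none_A n packages hnil, pv_aloop_none_B n _ _ _ hnil]
  · have hnil : PySem.List.pyRange 0 (pvRoundDiv n (packages.getD 0 0) + 2) 1 = [] :=
      PySem.List.pyRange_one_eq_nil (by omega)
    rw [hnil]; rfl
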